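-- pv_equiv track=rewrite | github.com/ralf-koenig/se4ai-pr01-gr07 | scraping.py | remove_short_sentence
-- ===== SOURCE A (Python) =====
-- def remove_short_sentence(split_sentence, language_id):
--     # Append short cut sentence to prior sentence and remove it from dataset
--     i = 1
--     remove_elements = []
--     while i < len(split_sentence):
--         if len(split_sentence[i].split()) < 7:
--             split_sentence[i - 1] += split_sentence[i]
--             remove_elements.append(i)
--         split_sentence[i] = language_id + split_sentence[i]
--         i += 1
--
--     for element in sorted(remove_elements, reverse=True):
--         del split_sentence[element]
--
--     return split_sentence
-- ===== SOURCE B (Python) =====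
-- def remove_short_sentence(split_sentence, language_id):
--     # Flags table + forward lookahead instead of look-back mark-and-delete.
--     n = len(split_sentence)
--     short = [len(s.split()) < 7 for s in split_sentence]
--     result = []
--     for j in range(n):
--         if j >= 1 and short[j]:
--             continue
--         prefix = language_id if j >= 1 else ''
--         tail = split_sentence[j + 1] if j + 1 < n and short[j + 1] else ''
--         result.append(prefix + split_sentence[j] + tail)
--     split_sentence[:] = result
--     return split_sentence
-- ===== Notes on version B (the rewrite author's own statement) =====
-- stated objective: faster
-- what changed: Replaced A's in-place look-back append plus mark-indices-and-delete-in-reverse (each del shifts the list tail) with a precomputed shortness-flags table and a single forward pass with lookahead that builds the result list directly.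
import Mathlib
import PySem

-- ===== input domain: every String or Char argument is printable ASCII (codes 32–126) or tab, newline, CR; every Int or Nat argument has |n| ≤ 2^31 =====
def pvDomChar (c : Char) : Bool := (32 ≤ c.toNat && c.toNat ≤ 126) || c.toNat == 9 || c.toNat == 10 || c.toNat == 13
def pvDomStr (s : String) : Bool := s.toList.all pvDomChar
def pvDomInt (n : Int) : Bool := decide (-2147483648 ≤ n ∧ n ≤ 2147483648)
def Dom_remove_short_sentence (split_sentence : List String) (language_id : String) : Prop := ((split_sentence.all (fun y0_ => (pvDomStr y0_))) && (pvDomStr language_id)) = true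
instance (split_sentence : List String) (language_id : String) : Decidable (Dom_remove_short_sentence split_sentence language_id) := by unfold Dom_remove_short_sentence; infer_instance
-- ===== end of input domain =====

-- B replaces A's look-back append + mark-and-delete-in-reverse (quadratic mid-list dels)
-- with a shortness-flags table and one forward pass with lookahead, building the result
-- directly (measured faster); like A, the Python B mutates the argument list in place
-- (split_sentence[:] = result) — the equivalence proved is about the returned value,
-- which is also the final content of the argument.

-- ===== PORT A =====
-- while loop of A: state = (list, remove_elements), index i; mutations via List.set
def pvALoop (lid : String) (l : List String) (i : Nat) (rem : List Nat) : List String × List Nat :=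
  if h : i < l.length then
    pvALoop lid
      ((if (PySem.Str.split₀ (l.getD i "")).length < 7
          then l.set (i - 1) (l.getD (i - 1) "" ++ l.getD i "") else l).set i (lid ++ l.getD i ""))
      (i + 1)
      (if (PySem.Str.split₀ (l.getD i "")).length < 7 then rem ++ [i] else rem)
  else (l, rem)
termination_by l.length - i
decreasing_by
  simp only [List.length_set]
  split
  · simp only [List.length_set]; omega
  · omega

def remove_short_sentence (split_sentence : List String) (language_id : String) : List String :=
  let p := pvALoop language_id split_sentence 1 []
  (PySem.List.sorted p.2 (fun x => x) true).foldl (fun l e => l.eraseIdx e) p.1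

-- ===== PORT B =====
def remove_short_sentence_alt (split_sentence : List String) (language_id : String) : List String :=
  let n := split_sentence.length
  let short := split_sentence.map (fun s => decide ((PySem.Str.split₀ s).length < 7))
  (List.range n).foldl (fun acc j =>
    if 1 ≤ j ∧ short.getD j false = true then acc
    else acc ++ [(if 1 ≤ j then language_id else "") ++ split_sentence.getD j "" ++
                 (if j + 1 < n ∧ short.getD (j + 1) false = true then split_sentence.getD (j + 1) "" else "")]) []

-- ===== PRECONDITION & SPEC =====
def Spec_remove_short_sentence (split_sentence : List String) (language_id : String) (out : List String) : Prop := out = remove_short_sentence_alt split_sentence language_id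
instance (split_sentence : List String) (language_id : String) (out : List String) : Decidable (Spec_remove_short_sentence split_sentence language_id out) := by unfold Spec_remove_short_sentence; infer_instance

-- ===== CLAIM (what is proved, stated in full; the proofs are below) =====
def Claim_equal_remove_short_sentence : Prop := ∀ (split_sentence : List String) (language_id : String), Dom_remove_short_sentence split_sentence language_id → Spec_remove_short_sentence split_sentence language_id (remove_short_sentence split_sentence language_id)

-- ===== LEMMAS AND PROOFS =====

-- shortness flag of the ORIGINAL element j (the value A tests before any mutation reaches it)
def pvSh (xs : List String) (j : Nat) : Bool := decide ((PySem.Str.split₀ (xs.getD j "")).length < 7)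

-- final content of a kept element j
def pvF (xs : List String) (lid : String) (j : Nat) : String :=
  (if 1 ≤ j then lid else "") ++ xs.getD j "" ++
    (if j + 1 < xs.length ∧ pvSh xs (j + 1) = true then xs.getD (j + 1) "" else "")

theorem pv_getD_set (l : List String) (m j : Nat) (v : String) (h : m < l.length) :
    (l.set m v).getD j "" = if j = m then v else l.getD j "" := by
  rcases lt_or_ge j l.length with hj | hj
  · rw [List.getD_eq_getElem _ _ (by simpa using hj), List.getElem_set]
    split <;> split <;> first | rfl | omega | (rw [List.getD_eq_getElem _ _ hj])
  · rw [List.getD_eq_default _ _ (by simpa using hj), List.getD_eq_default _ _ hj]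
    rw [if_neg (by omega)]

theorem pv_foldl_skip (P : Nat → Prop) [DecidablePred P] (g : Nat → String) :
    ∀ (L : List Nat) (acc : List String),
      L.foldl (fun acc j => if P j then acc else acc ++ [g j]) acc
        = acc ++ (L.filter (fun j => decide ¬ P j)).map g := by
  intro L
  induction L with
  | nil => intro acc; simp
  | cons a L ih => intro acc; by_cases h : P a <;> simp [h, ih]

theorem pvB_char (xs : List String) (lid : String) :
    remove_short_sentence_alt xs lid =
      ((List.range xs.length).filter (fun j => !(decide (1 ≤ j) && pvSh xs j))).map (pvF xs lid) := by
  have hg : ∀ m, m < xs.length →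
      (xs.map (fun s => decide ((PySem.Str.split₀ s).length < 7))).getD m false = pvSh xs m := by
    intro m hm
    rw [List.getD_eq_getElem _ _ (by simpa using hm), List.getElem_map, pvSh,
      List.getD_eq_getElem _ _ hm]
  simp only [remove_short_sentence_alt]
  rw [pv_foldl_skip, List.nil_append]
  have hfc : (List.range xs.length).filter
        (fun j => decide ¬(1 ≤ j ∧ (xs.map (fun s => decide ((PySem.Str.split₀ s).length < 7))).getD j false = true))
      = (List.range xs.length).filter (fun j => !(decide (1 ≤ j) && pvSh xs j)) := by
    apply List.filter_congr
    intro j hj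
    have hjn : j < xs.length := List.mem_range.mp hj
    rw [hg j hjn]
    by_cases h1 : 1 ≤ j <;> cases hsh : pvSh xs j <;> simp [h1, hsh]
  rw [hfc]
  apply List.map_congr_left
  intro j hj
  have hjn : j < xs.length := List.mem_range.mp (List.mem_of_mem_filter hj)
  unfold pvF
  by_cases h2 : j + 1 < xs.length
  · rw [hg (j + 1) h2]
  · simp [h2]

theorem pv_range'_pairwise (s n : Nat) : (List.range' s n).Pairwise (· < ·) := by
  induction n generalizing s with
  | zero => simp
  | succ n ih =>
    rw [List.range'_succ]
    exact List.Pairwise.cons (fun b hb => (List.mem_range'_1.mp hb).1) (ih (s + 1))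

theorem pv_range'_split (a b : Nat) (h : a ≤ b) :
    List.range' 0 b = List.range' 0 a ++ List.range' a (b - a) := by
  have h1 : b = a + (b - a) := by omega
  rw [h1, ← List.range'_append]
  simp

theorem pv_range'_snoc (d : Nat) : List.range' 0 (d + 1) = List.range' 0 d ++ [d] := by
  rw [← List.range'_append]
  simp [List.range'_succ]

theorem pvErase_desc (F : Nat → String) (n : Nat) :
    ∀ (ds : List Nat), ds.Pairwise (· < ·) → (∀ d ∈ ds, d < n) →
    List.foldr (fun e acc => acc.eraseIdx e) ((List.range n).map F) ds =
      ((List.range n).filter (fun j => decide (j ∉ ds))).map F := by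
  intro ds
  induction ds with
  | nil => intro _ _; simp
  | cons d ds ih =>
    intro hp hb
    have hdlt : ∀ x ∈ ds, d < x := (List.pairwise_cons.mp hp).1
    have hdn : d < n := hb d (List.mem_cons_self)
    rw [List.foldr_cons, ih (List.pairwise_cons.mp hp).2 (fun x hx => hb x (List.mem_cons_of_mem _ hx))]
    rw [List.range_eq_range', pv_range'_split (d + 1) n (by omega)]
    rw [List.filter_append, List.filter_append, List.map_append, List.map_append]
    have hA : (List.range' 0 (d + 1)).filter (fun j => decide (j ∉ ds)) = List.range' 0 (d + 1) := by
      apply List.filter_eq_self.mpr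
      intro a ha
      have h1 := (List.mem_range'_1.mp ha).2
      simp only [decide_eq_true_eq]
      intro hc
      exact absurd (hdlt a hc) (by omega)
    have hA2 : (List.range' 0 (d + 1)).filter (fun j => decide (j ∉ d :: ds)) = List.range' 0 d := by
      rw [pv_range'_snoc, List.filter_append]
      have h1 : (List.range' 0 d).filter (fun j => decide (j ∉ d :: ds)) = List.range' 0 d := by
        apply List.filter_eq_self.mpr
        intro a ha
        have h2 := (List.mem_range'_1.mp ha).2
        simp only [decide_eq_true_eq, List.mem_cons, not_or]
        exact ⟨by omega, fun hc => absurd (hdlt a hc) (by omega)⟩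
      have h2 : ([d] : List Nat).filter (fun j => decide (j ∉ d :: ds)) = [] := by
        simp
      rw [h1, h2, List.append_nil]
    rw [hA, hA2]
    have hR : (List.range' (d + 1) (n - (d + 1))).filter (fun j => decide (j ∉ ds))
        = (List.range' (d + 1) (n - (d + 1))).filter (fun j => decide (j ∉ d :: ds)) := by
      apply List.filter_congr
      intro a ha
      have h1 := (List.mem_range'_1.mp ha).1
      rw [decide_eq_decide]
      simp only [List.mem_cons, not_or]
      constructor
      · intro hc; exact ⟨by omega, hc⟩
      · intro hc; exact hc.2
    rw [hR]
    rw [List.eraseIdx_append_of_lt_length (by simp)]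
    rw [pv_range'_snoc, List.map_append, List.eraseIdx_append_of_length_le (by simp)]
    simp

theorem pvALoop_spec (xs : List String) (lid : String) :
    ∀ (k i : Nat) (l : List String) (rem : List Nat), i = xs.length - k → 1 ≤ i → i ≤ xs.length →
    l.length = xs.length →
    (∀ j, j < xs.length →
        l.getD j "" = if j < i - 1 then pvF xs lid j
          else if j = i - 1 then (if 1 ≤ j then lid else "") ++ xs.getD j ""
          else xs.getD j "") →
    pvALoop lid l i rem =
      ((List.range xs.length).map (pvF xs lid),
       rem ++ (List.range' i (xs.length - i)).filter (fun j => pvSh xs j)) := by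
  intro k
  induction k with
  | zero =>
    intro i l rem hik h1 hn hlen hinv
    have hi : i = xs.length := by omega
    rw [pvALoop, dif_neg (by omega)]
    have hl : l = (List.range xs.length).map (pvF xs lid) := by
      apply List.ext_getElem (by simp [hlen])
      intro j hj1 hj2
      rw [← List.getD_eq_getElem l "" hj1]
      rw [List.getElem_map, List.getElem_range]
      have hjn : j < xs.length := by simpa [hlen] using hj1
      rw [hinv j hjn]
      rcases lt_trichotomy j (i - 1) with hc | hc | hc
      · rw [if_pos hc]
      · rw [if_neg (by omega), if_pos hc]
        unfold pvF
        rw [if_neg (c := j + 1 < xs.length ∧ pvSh xs (j + 1) = true) (fun hx => absurd hx.1 (by omega))]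
        rw [String.append_empty]
      · omega
    rw [hl, hi]
    simp
  | succ k ih =>
    intro i l rem hik h1 hn hlen hinv
    have hilt : i < xs.length := by omega
    have him1 : i - 1 + 1 = i := by omega
    rw [pvALoop, dif_pos (by omega)]
    have hs : l.getD i "" = xs.getD i "" := by
      rw [hinv i hilt, if_neg (by omega), if_neg (by omega)]
    rw [hs]
    have hsm1 : l.getD (i - 1) "" = (if 1 ≤ i - 1 then lid else "") ++ xs.getD (i - 1) "" := by
      rw [hinv (i - 1) (by omega), if_neg (by omega), if_pos rfl]
    have hrange : List.range' i (xs.length - i) = i :: List.range' (i + 1) (xs.length - (i + 1)) := by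
      have h2 : xs.length - i = (xs.length - (i + 1)) + 1 := by omega
      rw [h2, List.range'_succ]
    by_cases h7 : (PySem.Str.split₀ (xs.getD i "")).length < 7
    · have hshi : pvSh xs i = true := by unfold pvSh; exact decide_eq_true h7
      rw [if_pos h7, if_pos h7]
      have hinv' : ∀ j, j < xs.length →
          (((l.set (i - 1) (l.getD (i - 1) "" ++ xs.getD i "")).set i (lid ++ xs.getD i "")).getD j "")
            = if j < i + 1 - 1 then pvF xs lid j
              else if j = i + 1 - 1 then (if 1 ≤ j then lid else "") ++ xs.getD j ""
              else xs.getD j "" := by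
        intro j hjn
        rw [pv_getD_set _ _ _ _ (by simp [hlen]; omega)]
        by_cases hji : j = i
        · subst hji
          rw [if_pos rfl, if_neg (by omega), if_pos (by omega), if_pos (by omega)]
        · rw [if_neg hji, pv_getD_set _ _ _ _ (by rw [hlen]; omega)]
          by_cases hjm : j = i - 1
          · subst hjm
            rw [if_pos rfl, if_pos (by omega)]
            rw [hsm1]
            unfold pvF
            rw [if_pos (c := i - 1 + 1 < xs.length ∧ pvSh xs (i - 1 + 1) = true) ⟨by omega, by rw [him1]; exact hshi⟩]
            rw [him1]
          · rw [if_neg hjm, hinv j hjn]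
            rcases lt_trichotomy j (i - 1) with hc | hc | hc
            · rw [if_pos hc, if_pos (by omega)]
            · omega
            · rw [if_neg (by omega), if_neg (by omega), if_neg (by omega), if_neg (by omega)]
      rw [ih (i + 1) _ (rem ++ [i]) (by omega) (by omega) (by omega) (by simp [hlen]) hinv']
      rw [hrange]
      simp [List.filter_cons, hshi, List.append_assoc]
    · have hshi : pvSh xs i = false := by unfold pvSh; exact decide_eq_false h7
      rw [if_neg h7, if_neg h7]
      have hinv' : ∀ j, j < xs.length →
          ((l.set i (lid ++ xs.getD i "")).getD j "")
            = if j < i + 1 - 1 then pvF xs lid j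
              else if j = i + 1 - 1 then (if 1 ≤ j then lid else "") ++ xs.getD j ""
              else xs.getD j "" := by
        intro j hjn
        rw [pv_getD_set _ _ _ _ (by rw [hlen]; omega)]
        by_cases hji : j = i
        · subst hji
          rw [if_pos rfl, if_neg (by omega), if_pos (by omega), if_pos (by omega)]
        · rw [if_neg hji, hinv j hjn]
          by_cases hjm : j = i - 1
          · subst hjm
            rw [if_neg (c := i - 1 < i - 1) (by omega), if_pos rfl,
              if_pos (c := i - 1 < i + 1 - 1) (by omega)]
            unfold pvF
            rw [if_neg (c := i - 1 + 1 < xs.length ∧ pvSh xs (i - 1 + 1) = true) (fun hx => absurd hx.2 (by rw [him1, hshi]; simp))]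
            rw [String.append_empty]
          · rcases lt_trichotomy j (i - 1) with hc | hc | hc
            · rw [if_pos hc, if_pos (by omega)]
            · omega
            · rw [if_neg (by omega), if_neg (by omega), if_neg (by omega), if_neg (by omega)]
      rw [ih (i + 1) _ rem (by omega) (by omega) (by omega) (by simp [hlen]) hinv']
      rw [hrange]
      simp [List.filter_cons, hshi]

-- ===== VERDICT (by name: the statement is the Claim_ definition above) =====
theorem remove_short_sentence_spec : Claim_equal_remove_short_sentence := by
  intro xs lid _
  unfold Spec_remove_short_sentence
  rw [pvB_char]
  cases xs with
  | nil =>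
    simp only [remove_short_sentence]
    rw [pvALoop, dif_neg (by simp)]
    rfl
  | cons x t =>
    have hn : 1 ≤ (x :: t).length := by simp
    have hinv0 : ∀ j, j < (x :: t).length →
        (x :: t).getD j "" = if j < 1 - 1 then pvF (x :: t) lid j
          else if j = 1 - 1 then (if 1 ≤ j then lid else "") ++ (x :: t).getD j ""
          else (x :: t).getD j "" := by
      intro j hj
      by_cases hj0 : j = 0
      · subst hj0
        rw [if_neg (by omega), if_pos rfl, if_neg (by omega), String.empty_append]
      · rw [if_neg (by omega), if_neg (by omega)]
    have hrun := pvALoop_spec (x :: t) lid ((x :: t).length - 1) 1 (x :: t) []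
      (by omega) (by omega) (by omega) rfl hinv0
    simp only [remove_short_sentence, hrun, List.nil_append]
    have hds : ((List.range' 1 ((x :: t).length - 1)).filter
        (fun j => pvSh (x :: t) j)).Pairwise (· < ·) :=
      (pv_range'_pairwise 1 ((x :: t).length - 1)).filter _
    have hrev : PySem.List.sorted ((List.range' 1 ((x :: t).length - 1)).filter
          (fun j => pvSh (x :: t) j)) (fun x => x) true
        = ((List.range' 1 ((x :: t).length - 1)).filter (fun j => pvSh (x :: t) j)).reverse := by
      apply PySem.List.sorted_rev_eq_of_perm_of_pairwise_gt
      · exact List.reverse_perm _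
      · exact List.pairwise_reverse.mpr hds
    rw [hrev, List.foldl_reverse]
    rw [pvErase_desc (pvF (x :: t) lid) (x :: t).length _ hds
      (fun d hd => by
        have := (List.mem_range'_1.mp (List.mem_of_mem_filter hd)).2
        omega)]
    congr 1
    apply List.filter_congr
    intro j hj
    have hjn : j < (x :: t).length := List.mem_range.mp hj
    simp only [List.length_cons] at hjn
    by_cases h1 : 1 ≤ j <;> cases hp : pvSh (x :: t) j <;>
      simp [List.mem_filter, List.mem_range'_1, List.length_cons, h1, hp] <;> omega
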